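-- pv_equiv track=rewrite | github.com/localparty/integers | paper28-pvnp/clone-growth-fullness-bridge/code/instance_diversity_test.py | minority_threshold
-- ===== SOURCE A (Python) =====
-- def minority_threshold(args):
--     """
--     Minority function: returns 1 iff sum of inputs < ceil(k/2).
--     This is a DIFFERENT polymorphism from majority.
--     For 2-SAT: minority is also a polymorphism (the dual).
--     """
--     k = len(args)
--     n = len(args[0])
--     threshold = (k + 1) // 2
--     result = []
--     for j in range(n):
--         s = sum(a[j] for a in args)
--         result.append(1 if s < threshold else 0)
--     return tuple(result)
-- ===== SOURCE B (Python) =====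
-- def minority_threshold(args):
--     # Row-major accumulation: one running column-sum accumulator carried across
--     # the arrays, instead of recomputing each column's sum independently.
--     n = len(args[0])
--     sums = [0] * n
--     for a in args:
--         sums = [s + a[j] for j, s in enumerate(sums)]
--     threshold = (len(args) + 1) // 2
--     return tuple(1 if s < threshold else 0 for s in sums)
-- ===== Notes on version B (the rewrite author's own statement) =====
-- stated objective: alternative
-- what changed: Column-major recomputation of each column sum is replaced by row-major accumulation: a running sums accumulator is updated once per input array and the output is mapped from it.
import Mathlib
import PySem

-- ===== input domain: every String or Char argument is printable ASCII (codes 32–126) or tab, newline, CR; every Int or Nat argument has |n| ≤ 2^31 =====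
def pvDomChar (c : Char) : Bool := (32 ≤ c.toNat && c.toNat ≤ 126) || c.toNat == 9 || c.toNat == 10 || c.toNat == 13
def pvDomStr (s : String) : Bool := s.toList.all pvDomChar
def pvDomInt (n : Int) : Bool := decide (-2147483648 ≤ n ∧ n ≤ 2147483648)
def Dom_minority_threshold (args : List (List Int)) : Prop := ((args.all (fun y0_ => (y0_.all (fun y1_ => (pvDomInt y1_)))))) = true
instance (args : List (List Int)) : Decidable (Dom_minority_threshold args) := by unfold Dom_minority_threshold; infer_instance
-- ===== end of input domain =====

-- B replaces A's per-column recomputation of the sum by one running column-sum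
-- accumulator updated row by row (objective: alternative decomposition, same cost).

-- ===== PORT A =====
-- literal port of A: column-major; for each j in range(n), s = sum(a[j] for a in args)
def minority_threshold (args : List (List Int)) : List Int :=
  let k : Int := args.length
  let n : Int := (PySem.List.pyGetD args 0 ([] : List Int)).length
  let threshold : Int := PySem.Int.floordiv (k + 1) 2
  (PySem.List.pyRange 0 n 1).foldl
    (fun result j =>
      let s : Int := (args.map (fun a => PySem.List.pyGetD a j 0)).sum
      result ++ [if s < threshold then 1 else 0])
    []

-- ===== PORT B =====
-- literal port of Source B: row-major running accumulator 'sums', rebuilt per array via enumerate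
def minority_threshold_alt (args : List (List Int)) : List Int :=
  let n : Int := (PySem.List.pyGetD args 0 ([] : List Int)).length
  let sums : List Int := args.foldl
    (fun sums a => (PySem.List.enumerate sums).map (fun js => js.2 + PySem.List.pyGetD a js.1 0))
    (List.replicate n.toNat 0)
  let threshold : Int := PySem.Int.floordiv ((args.length : Int) + 1) 2
  sums.map (fun s => if s < threshold then 1 else 0)

-- ===== PRECONDITION & SPEC =====
-- Pre_ excludes exactly the inputs where Python A raises IndexError: empty args
-- (args[0]) or a row shorter than the first row (a[j]).
def Pre_minority_threshold (args : List (List Int)) : Prop :=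
  args ≠ [] ∧ ∀ a ∈ args, (PySem.List.pyGetD args 0 ([] : List Int)).length ≤ a.length
instance (args : List (List Int)) : Decidable (Pre_minority_threshold args) := by
  unfold Pre_minority_threshold; infer_instance
def pvWitness_minority_threshold : List (List Int) := [[1, 0], [0, 0], [1, 1]]

def Spec_minority_threshold (args : List (List Int)) (out : List Int) : Prop := out = minority_threshold_alt args
instance (args : List (List Int)) (out : List Int) : Decidable (Spec_minority_threshold args out) := by unfold Spec_minority_threshold; infer_instance

-- ===== CLAIM (what is proved, stated in full; the proofs are below) =====
def Claim_equal_minority_threshold : Prop := ∀ (args : List (List Int)), Dom_minority_threshold args → Pre_minority_threshold args → Spec_minority_threshold args (minority_threshold args)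

-- ===== LEMMAS AND PROOFS =====

-- column sum of column j over the rows L (the value both programs accumulate)
def pvColSum (L : List (List Int)) (j : Int) : Int :=
  (L.map (fun a => PySem.List.pyGetD a j 0)).sum

theorem pvColSum_cons (a : List Int) (L : List (List Int)) (j : Int) :
    pvColSum (a :: L) j = PySem.List.pyGetD a j 0 + pvColSum L j := by
  simp [pvColSum]

-- B's accumulator loop, characterised: starting from a column-indexed map and
-- folding the rows adds every column's sum pointwise.
theorem pvFold_char (L : List (List Int)) (n : Nat) (c : Int → Int) :
    L.foldl
      (fun sums a => (PySem.List.enumerate sums).map (fun js => js.2 + PySem.List.pyGetD a js.1 0))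
      ((PySem.List.pyRange 0 (n : Int) 1).map c)
    = (PySem.List.pyRange 0 (n : Int) 1).map (fun j => c j + pvColSum L j) := by
  induction L generalizing c with
  | nil => simp [pvColSum]
  | cons a L ih =>
    simp only [List.foldl_cons]
    have hstep : (PySem.List.enumerate ((PySem.List.pyRange 0 (n : Int) 1).map c)).map
        (fun js => js.2 + PySem.List.pyGetD a js.1 0)
        = (PySem.List.pyRange 0 (n : Int) 1).map (fun j => c j + PySem.List.pyGetD a j 0) := by
      rw [PySem.List.enumerate_eq_map_pyRange (d := (0 : Int))]
      have hlen : (PySem.List.len (((PySem.List.pyRange 0 (n : Int) 1).map c)) : Int) = (n : Int) := by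
        simp [PySem.List.length_pyRange_one]
      rw [hlen, List.map_map]
      refine List.map_congr_left ?_
      intro j hj
      have hj' := (PySem.List.mem_pyRange_one).1 hj
      have h0 : (0:Int) ≤ j := hj'.1
      simp only [Function.comp]
      rw [PySem.List.pyGetD_map_pyRange_of_nonneg c (n : Int) j 0 h0 hj'.2]
    rw [hstep, ih (fun j => c j + PySem.List.pyGetD a j 0)]
    refine List.map_congr_left ?_
    intro j _
    rw [pvColSum_cons]; ring

theorem pvReplicate_eq_map (n : Nat) :
    List.replicate n (0 : Int) = (PySem.List.pyRange 0 (n : Int) 1).map (fun _ => 0) := by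
  rw [List.map_const']
  congr 1
  rw [PySem.List.length_pyRange_one]
  omega

-- ===== VERDICT (by name: the statement is the Claim_ definition above) =====
theorem minority_threshold_spec : Claim_equal_minority_threshold := by
  intro args _ _
  unfold Spec_minority_threshold minority_threshold minority_threshold_alt
  simp only [Int.toNat_natCast]
  rw [PySem.List.foldl_append_singleton_eq_map]
  rw [pvReplicate_eq_map, pvFold_char]
  rw [List.map_map]
  refine List.map_congr_left ?_
  intro j _
  simp [pvColSum]
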